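-- pv_equiv track=rewrite | github.com/SourabhShenoy/Python-Code | Google Foobar/FooBar/ineff_queue.py | answer
-- ===== SOURCE A (Python) =====
-- def answer(start, length):
--     xsum = 0
--     col = length
--     row = length + 1
--     val = start
--     ct = 0
--
--     for _ in range(col):
--     	val = start + ct * length
--     	ct += 1
--     	row -= 1
--     	for _ in range(row):
--     		xsum = xsum ^ val
--     		val +=1
--
--     return xsum
-- ===== SOURCE B (Python) =====
-- def answer(start, length):
--     # O(length): each row's XOR comes from the closed-form prefix-XOR P, no inner loop.
--     def F(n):  # XOR of 0..n for n >= 0, by the n % 4 pattern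
--         return (n, 1, n + 1, 0)[n % 4]
--
--     def P(n):  # prefix XOR: XOR of 0..n for n >= 0; XOR of (n+1)..-1 for n < 0
--         if n >= 0:
--             return F(n)
--         m = -n - 2
--         x = F(m) if m >= 0 else 0
--         return x ^ -1 if n % 2 == 0 else x
--
--     xsum = 0
--     for i in range(length):
--         lo = start + i * length
--         hi = lo + (length - 1 - i)
--         xsum ^= P(hi) ^ P(lo - 1)
--     return xsum
-- ===== Notes on version B (the rewrite author's own statement) =====
-- stated objective: faster
-- what changed: Replaces A's nested per-element XOR loops with one pass over the rows, computing each row's XOR in O(1) from the closed-form prefix-XOR function (xor of 0..n determined by n mod 4, extended to negative integers via complement).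
import Mathlib
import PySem

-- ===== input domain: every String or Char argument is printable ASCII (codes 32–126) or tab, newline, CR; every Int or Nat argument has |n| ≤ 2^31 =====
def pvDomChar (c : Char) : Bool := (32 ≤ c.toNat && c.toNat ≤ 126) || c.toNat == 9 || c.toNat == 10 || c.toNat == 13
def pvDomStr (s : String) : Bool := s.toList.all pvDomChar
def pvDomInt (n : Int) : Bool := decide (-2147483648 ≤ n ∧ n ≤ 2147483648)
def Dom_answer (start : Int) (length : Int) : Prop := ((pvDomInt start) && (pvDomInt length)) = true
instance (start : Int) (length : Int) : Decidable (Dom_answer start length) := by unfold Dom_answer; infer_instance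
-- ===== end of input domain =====

-- B replaces A's quadratic row-by-row XOR loop with a closed-form prefix-XOR per row (O(length) total).

-- ===== PORT A =====
-- inner loop body: xsum = xsum ^ val; val += 1
def answer_inner (p : Int × Int) (_ : Int) : Int × Int :=
  (PySem.Int.bxor p.1 p.2, p.2 + 1)

-- outer loop body over state (xsum, row, val, ct)
def answer_outer (start : Int) (length : Int) (st : Int × Int × Int × Int) (_ : Int) :
    Int × Int × Int × Int :=
  let val := start + st.2.2.2 * length
  let ct := st.2.2.2 + 1
  let row := st.2.1 - 1
  let inner := (PySem.List.pyRange 0 row 1).foldl answer_inner (st.1, val)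
  (inner.1, row, inner.2, ct)

def answer (start : Int) (length : Int) : Int :=
  ((PySem.List.pyRange 0 length 1).foldl (answer_outer start length)
    (0, length + 1, start, 0)).1

-- ===== PORT B =====
-- F(n) = (n, 1, n + 1, 0)[n % 4]
def answer_F (n : Int) : Int :=
  let r := PySem.Int.mod n 4
  if r = 0 then n else if r = 1 then 1 else if r = 2 then n + 1 else 0

-- P(n): prefix XOR
def answer_P (n : Int) : Int :=
  if 0 ≤ n then answer_F n
  else
    let m := -n - 2
    let x := if 0 ≤ m then answer_F m else 0
    if PySem.Int.mod n 2 = 0 then PySem.Int.bxor x (-1) else x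

-- loop body: xsum ^= P(hi) ^ P(lo - 1)
def answer_bstep (start : Int) (length : Int) (xsum : Int) (i : Int) : Int :=
  let lo := start + i * length
  let hi := lo + (length - 1 - i)
  PySem.Int.bxor xsum (PySem.Int.bxor (answer_P hi) (answer_P (lo - 1)))

def answer_alt (start : Int) (length : Int) : Int :=
  (PySem.List.pyRange 0 length 1).foldl (answer_bstep start length) 0

-- ===== PRECONDITION & SPEC =====
def Spec_answer (start : Int) (length : Int) (out : Int) : Prop := out = answer_alt start length
instance (start : Int) (length : Int) (out : Int) : Decidable (Spec_answer start length out) := by unfold Spec_answer; infer_instance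

-- ===== CLAIM (what is proved, stated in full; the proofs are below) =====
def Claim_equal_answer : Prop := ∀ (start : Int) (length : Int), Dom_answer start length → Spec_answer start length (answer start length)

-- ===== LEMMAS AND PROOFS =====

theorem bxor_eq_xor (a b : Int) : PySem.Int.bxor a b = Int.xor a b := by
  cases a <;> cases b <;> simp [PySem.Int.bxor, Int.xor] <;> omega

theorem bxor_assoc (a b c : Int) :
    PySem.Int.bxor (PySem.Int.bxor a b) c = PySem.Int.bxor a (PySem.Int.bxor b c) := by
  simp only [bxor_eq_xor]
  cases a <;> cases b <;> cases c <;> simp [Int.xor, Nat.xor_assoc]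

theorem bxor_not (a : Int) : PySem.Int.bxor a (-1) = -a - 1 := by
  cases a <;> simp [PySem.Int.bxor]

theorem zero_bxor (a : Int) : PySem.Int.bxor 0 a = a := by
  rw [PySem.Int.bxor_comm]; exact PySem.Int.bxor_zero a

theorem bxor_left_comm (a b c : Int) :
    PySem.Int.bxor a (PySem.Int.bxor b c) = PySem.Int.bxor b (PySem.Int.bxor a c) := by
  rw [← bxor_assoc, PySem.Int.bxor_comm a b, bxor_assoc]

theorem bxor_neg_sub (n : Int) : PySem.Int.bxor (-n - 1) n = -1 := by
  rw [← bxor_not n, PySem.Int.bxor_comm n (-1), bxor_assoc, PySem.Int.bxor_self,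
    PySem.Int.bxor_zero]

theorem xor_double_succ (k : Nat) : (2 * k) ^^^ (2 * k + 1) = 1 := by
  apply Nat.eq_of_testBit_eq
  intro i
  have h1 : (2 * k) / 2 = k := by omega
  have h2 : (2 * k + 1) / 2 = k := by omega
  cases i with
  | zero => simp [Nat.testBit_zero]
  | succ j =>
    rw [Nat.testBit_xor]
    simp [Nat.testBit_succ, h1, h2]

theorem xor_double_one (k : Nat) : (2 * k) ^^^ 1 = 2 * k + 1 := by
  apply Nat.eq_of_testBit_eq
  intro i
  have h1 : (2 * k) / 2 = k := by omega
  have h2 : (2 * k + 1) / 2 = k := by omega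
  cases i with
  | zero => simp [Nat.testBit_zero]
  | succ j =>
    rw [Nat.testBit_xor]
    simp [Nat.testBit_succ, h1, h2]

-- step property of the non-negative prefix formula
theorem answer_F_step (n : Int) (h : 1 ≤ n) :
    answer_F n = PySem.Int.bxor (answer_F (n - 1)) n := by
  have h4 : PySem.Int.mod n 4 = n % 4 := PySem.Int.mod_eq_emod_of_pos (by norm_num)
  have h4' : PySem.Int.mod (n - 1) 4 = (n - 1) % 4 := PySem.Int.mod_eq_emod_of_pos (by norm_num)
  have hr : n % 4 = 0 ∨ n % 4 = 1 ∨ n % 4 = 2 ∨ n % 4 = 3 := by omega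
  rcases hr with hr | hr | hr | hr
  · have hr' : (n - 1) % 4 = 3 := by omega
    simp [answer_F, hr, hr', zero_bxor]
  · have hr' : (n - 1) % 4 = 0 := by omega
    obtain ⟨k, hk⟩ : ∃ k : Nat, n = 2 * (k : Int) + 1 := ⟨((n - 1) / 2).toNat, by omega⟩
    simp only [answer_F, h4, h4', hr, hr']
    norm_num
    subst hk
    rw [show (2 * (k : Int) + 1 - 1) = ((2 * k : Nat) : Int) by push_cast; ring,
      show (2 * (k : Int) + 1) = ((2 * k + 1 : Nat) : Int) by push_cast; ring,
      PySem.Int.bxor_natCast, xor_double_succ]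
    norm_num
  · have hr' : (n - 1) % 4 = 1 := by omega
    obtain ⟨k, hk⟩ : ∃ k : Nat, n = 2 * (k : Int) := ⟨(n / 2).toNat, by omega⟩
    simp only [answer_F, h4, h4', hr, hr']
    norm_num
    subst hk
    rw [PySem.Int.bxor_comm,
      show (2 * (k : Int)) = ((2 * k : Nat) : Int) by push_cast; ring,
      show ((1 : Int)) = ((1 : Nat) : Int) by norm_num,
      PySem.Int.bxor_natCast, xor_double_one]
    push_cast; ring
  · have hr' : (n - 1) % 4 = 2 := by omega
    simp only [answer_F, h4, h4', hr, hr']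
    norm_num

-- step property of the full prefix function: P(n) = P(n-1) ^ n for every integer n
theorem answer_P_step (n : Int) :
    answer_P n = PySem.Int.bxor (answer_P (n - 1)) n := by
  rcases lt_trichotomy n 0 with hn | hn | hn
  · -- n < 0
    rcases eq_or_lt_of_le (by omega : n ≤ -1) with h1 | h1
    · subst h1; decide
    · have hn2 : n ≤ -2 := by omega
      have hpar : n % 2 = 0 ∨ n % 2 = 1 := by omega
      have hm2 : PySem.Int.mod n 2 = n % 2 := PySem.Int.mod_eq_emod_of_pos (by norm_num)
      have hm2' : PySem.Int.mod (n - 1) 2 = (n - 1) % 2 := PySem.Int.mod_eq_emod_of_pos (by norm_num)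
      have hF : answer_F (-n - 1) = PySem.Int.bxor (answer_F (-n - 2)) (-n - 1) := by
        have := answer_F_step (-n - 1) (by omega)
        rwa [show (-n - 1 - 1) = -n - 2 by ring] at this
      rcases hpar with hpar | hpar
      · -- n even, n ≤ -2
        have hpar' : (n - 1) % 2 = 1 := by omega
        simp only [answer_P, if_neg (by omega : ¬ (0 ≤ n)), if_neg (by omega : ¬ (0 ≤ n - 1)),
          if_pos (by omega : (0 : Int) ≤ -n - 2), if_pos (by omega : (0 : Int) ≤ -(n - 1) - 2),
          hm2, hm2', hpar, hpar']
        norm_num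
        rw [show (1 - n - 2 : Int) = -n - 1 by ring, hF, bxor_assoc, bxor_neg_sub]
      · -- n odd, n ≤ -3
        have hpar' : (n - 1) % 2 = 0 := by omega
        simp only [answer_P, if_neg (by omega : ¬ (0 ≤ n)), if_neg (by omega : ¬ (0 ≤ n - 1)),
          if_pos (by omega : (0 : Int) ≤ -n - 2), if_pos (by omega : (0 : Int) ≤ -(n - 1) - 2),
          hm2, hm2', hpar, hpar']
        norm_num
        rw [show (1 - n - 2 : Int) = -n - 1 by ring, hF, bxor_assoc, bxor_assoc,
          PySem.Int.bxor_comm (-1) n, bxor_not,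
          PySem.Int.bxor_self, PySem.Int.bxor_zero]
  · subst hn; decide
  · -- 1 ≤ n
    have h0 : (0 : Int) ≤ n := by omega
    have h0' : (0 : Int) ≤ n - 1 := by omega
    simp only [answer_P, if_pos h0, if_pos h0']
    exact answer_F_step n (by omega)

def answer_istep (p : Int × Int) : Int × Int := (PySem.Int.bxor p.1 p.2, p.2 + 1)

theorem foldl_inner (l : List Int) (p : Int × Int) :
    l.foldl answer_inner p = answer_istep^[l.length] p := by
  induction l generalizing p with
  | nil => rfl
  | cons a t ih =>
    simp only [List.foldl_cons, List.length_cons, Function.iterate_succ_apply, ih]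
    rfl

theorem xor_shuffle (x v A B : Int) :
    PySem.Int.bxor (PySem.Int.bxor x v) (PySem.Int.bxor A (PySem.Int.bxor B v)) =
      PySem.Int.bxor x (PySem.Int.bxor A B) := by
  rw [bxor_assoc, bxor_left_comm v, bxor_left_comm v, PySem.Int.bxor_self,
    PySem.Int.bxor_zero]

theorem inner_val (m : Nat) (x v : Int) :
    answer_istep^[m] (x, v) =
      (PySem.Int.bxor x (PySem.Int.bxor (answer_P (v + m - 1)) (answer_P (v - 1))), v + m) := by
  induction m generalizing x v with
  | zero =>
    simp [PySem.Int.bxor_self, PySem.Int.bxor_zero]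
  | succ k ih =>
    rw [Function.iterate_succ_apply, show answer_istep (x, v) = (PySem.Int.bxor x v, v + 1) from rfl,
      ih]
    rw [Prod.mk.injEq]
    refine ⟨?_, ?_⟩
    · rw [show (v + 1 + (k : Int) - 1) = v + k by ring,
        show (v + 1 - 1 : Int) = v by ring,
        answer_P_step v,
        show (v + ((k : Nat) + 1 : Nat) - 1 : Int) = v + k by push_cast; ring,
        xor_shuffle]
    · push_cast; ring

theorem outer_val (start length : Int) (n : Nat) (hn : (n : Int) ≤ length) :
    ∃ v, ((List.range n).map (fun k : Nat => (0 : Int) + (k : Int))).foldl (answer_outer start length)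
        (0, length + 1, start, 0) =
      (((List.range n).map (fun k : Nat => (0 : Int) + (k : Int))).foldl (answer_bstep start length) 0,
        length + 1 - n, v, (n : Int)) := by
  induction n with
  | zero => exact ⟨start, by simp⟩
  | succ k ih =>
    obtain ⟨v, hv⟩ := ih (by push_cast at hn ⊢; omega)
    rw [List.range_succ, List.map_append, List.foldl_append, List.foldl_append, hv]
    have hrow : (0 : Int) ≤ length - k := by push_cast at hn ⊢; omega
    have hm : (((length - k).toNat : Int)) = length - k := by omega
    refine ⟨start + k * length + (length - k), ?_⟩
    simp only [List.map_cons, List.map_nil, List.foldl_cons, List.foldl_nil, answer_outer,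
      PySem.List.pyRange_one, foldl_inner, List.length_map, List.length_range]
    rw [show (length + 1 - (k : Int) - 1) = length - k by ring,
      show (length - (k : Int) - 0) = length - k by ring]
    rw [inner_val ((length - (k : Int)).toNat) _ (start + (k : Int) * length)]
    simp only [answer_bstep, hm]
    rw [show (start + (k : Int) * length + (length - k) - 1) =
        start + (0 + (k : Int)) * length + (length - 1 - (0 + k)) by ring,
      show (start + (k : Int) * length - 1) = start + (0 + (k : Int)) * length - 1 by ring,
      Prod.mk.injEq, Prod.mk.injEq, Prod.mk.injEq]
    refine ⟨rfl, by push_cast; ring, rfl, by push_cast; ring⟩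

-- ===== VERDICT (by name: the statement is the Claim_ definition above) =====
theorem answer_spec : Claim_equal_answer := by
  unfold Claim_equal_answer
  intro start length _
  unfold Spec_answer answer answer_alt
  by_cases hl : 0 ≤ length
  · have hn : ((length.toNat : Int)) ≤ length := by omega
    obtain ⟨v, hv⟩ := outer_val start length length.toNat hn
    rw [PySem.List.pyRange_one, show (length - 0).toNat = length.toNat by omega, hv]
  · rw [PySem.List.pyRange_one, show (length - 0).toNat = 0 by omega]

    rfl
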